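-- pv_equiv track=rewrite | github.com/jurajobm/advent-of-code-2022 | day2/main_part_two.py | step_score
-- ===== SOURCE A (Python) =====
-- def step_score(moves:list[str]) -> list[int]:
--     # Take moves and calculate score for each step
--     points = []
--
--     for line in moves:
--         if line[0] == 'A': #rock
--             if line[2] == 'Y':
--                 points += [4] # 3 for draw, 1 for rock
--             elif line[2] == 'Z':
--                 points += [8] # 6 for win, 2 for paper
--             else:
--                 points += [3]
--         elif line[0] == 'B': #paper
--             if line[2] == 'Y':
--                 points += [5] # 3 for draw, 2 for paper
--             elif line[2] == 'Z':
--                 points += [9] # 6 for win, 3 for scissors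
--             else:
--                 points += [1]
--         elif line[0] == 'C': # scissors
--             if line[2] == 'Y':
--                 points += [6] # 3 for draw, 3 for scissors
--             elif line[2] == 'Z':
--                 points += [7] # 6 for win, 1 for rock
--             else:
--                 points += [2]
--     return points
-- ===== SOURCE B (Python) =====
-- def step_score(moves: list[str]) -> list[int]:
--     # Staged pipeline: select the valid rounds once, then derive the outcome,
--     # chosen-shape and score columns from them.
--     valid = [line for line in moves if line[:1] in ('A', 'B', 'C')]
--     outcomes = [2 if line[2] == 'Z' else 1 if line[2] == 'Y' else 0 for line in valid]
--     shapes = [('ABC'.find(line[0]) + o - 1) % 3 for line, o in zip(valid, outcomes)]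
--     return [s + 1 + 3 * o for s, o in zip(shapes, outcomes)]
-- ===== Notes on version B (the rewrite author's own statement) =====
-- stated objective: alternative
-- what changed: Replaces the single accumulator loop with nine nested if/elif branches by a staged pipeline of comprehensions: filter the valid rounds, derive an outcomes column, a chosen-shape column via 'ABC'.find and modular arithmetic, and zip them into scores.
import Mathlib
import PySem

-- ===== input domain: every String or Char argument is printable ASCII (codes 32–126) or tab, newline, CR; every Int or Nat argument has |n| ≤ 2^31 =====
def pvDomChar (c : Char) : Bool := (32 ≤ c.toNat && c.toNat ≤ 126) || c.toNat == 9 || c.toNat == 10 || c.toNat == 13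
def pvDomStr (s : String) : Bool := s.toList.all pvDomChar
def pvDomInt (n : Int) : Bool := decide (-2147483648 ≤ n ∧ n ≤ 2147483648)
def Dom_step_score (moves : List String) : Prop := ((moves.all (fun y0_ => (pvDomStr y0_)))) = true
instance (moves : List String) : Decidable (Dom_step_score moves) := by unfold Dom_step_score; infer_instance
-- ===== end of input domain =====

-- B replaces the single nested-if accumulator loop by a staged pipeline: filter the valid rounds, then derive outcome, shape and score columns (alternative decomposition, same cost).


-- ===== PORT A =====
-- Accumulator loop; a `none` from pyGet? marks an input Python raises on (excluded by Pre_), the accumulator is left unchanged there.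
def step_score (moves : List String) : List Int :=
  moves.foldl (fun points line =>
    match PySem.Str.pyGet? line 0 with
    | none => points
    | some c0 =>
      if c0 = 'A' then
        match PySem.Str.pyGet? line 2 with
        | none => points
        | some c2 => if c2 = 'Y' then points ++ [4] else if c2 = 'Z' then points ++ [8] else points ++ [3]
      else if c0 = 'B' then
        match PySem.Str.pyGet? line 2 with
        | none => points
        | some c2 => if c2 = 'Y' then points ++ [5] else if c2 = 'Z' then points ++ [9] else points ++ [1]
      else if c0 = 'C' then
        match PySem.Str.pyGet? line 2 with
        | none => points
        | some c2 => if c2 = 'Y' then points ++ [6] else if c2 = 'Z' then points ++ [7] else points ++ [2]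
      else points) []

-- ===== PORT B =====
-- Staged pipeline, one definition per comprehension of Source B; `none` from pyGet? marks inputs Python raises on (excluded by Pre_).
def step_score_alt (moves : List String) : List Int :=
  let valid := moves.filter (fun line =>
    let h := PySem.Chars.slice line.toList (some 0) (some 1)   -- line[:1]
    h == ['A'] || h == ['B'] || h == ['C'])
  let outcomes : List Int := valid.map (fun line =>
    match PySem.Str.pyGet? line 2 with
    | none => 0
    | some c2 => if c2 = 'Z' then 2 else if c2 = 'Y' then 1 else 0)
  let shapes : List Int := (valid.zip outcomes).map (fun lo =>
    match PySem.Str.pyGet? lo.1 0 with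
    | none => 0
    | some c0 => PySem.Int.mod (PySem.Chars.find ['A', 'B', 'C'] [c0] + lo.2 - 1) 3)
  (shapes.zip outcomes).map (fun so => so.1 + 1 + 3 * so.2)

-- ===== PRECONDITION & SPEC =====
-- Pre_ excludes exactly the inputs on which Python A raises IndexError: an empty line, or a line
-- starting with A/B/C that is shorter than 3 characters.
def Pre_step_score (moves : List String) : Prop :=
  ∀ line ∈ moves, line.toList ≠ [] ∧
    (line.toList.head? = some 'A' ∨ line.toList.head? = some 'B' ∨ line.toList.head? = some 'C' →
      3 ≤ line.toList.length)
instance (moves : List String) : Decidable (Pre_step_score moves) := by unfold Pre_step_score; infer_instance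

def pvWitness_step_score : List String := ["A Y", "C Z", "D Q", "B X"]

def Spec_step_score (moves : List String) (out : List Int) : Prop := out = step_score_alt moves
instance (moves : List String) (out : List Int) : Decidable (Spec_step_score moves out) := by unfold Spec_step_score; infer_instance

-- ===== CLAIM (what is proved, stated in full; the proofs are below) =====
def Claim_equal_step_score : Prop := ∀ (moves : List String), Dom_step_score moves → Pre_step_score moves → Spec_step_score moves (step_score moves)

-- ===== LEMMAS AND PROOFS =====

-- A's per-line contribution (proof helper only).
def perA (line : String) : List Int :=
  match PySem.Str.pyGet? line 0 with
  | none => []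
  | some c0 =>
    if c0 = 'A' then
      match PySem.Str.pyGet? line 2 with
      | none => []
      | some c2 => if c2 = 'Y' then [4] else if c2 = 'Z' then [8] else [3]
    else if c0 = 'B' then
      match PySem.Str.pyGet? line 2 with
      | none => []
      | some c2 => if c2 = 'Y' then [5] else if c2 = 'Z' then [9] else [1]
    else if c0 = 'C' then
      match PySem.Str.pyGet? line 2 with
      | none => []
      | some c2 => if c2 = 'Y' then [6] else if c2 = 'Z' then [7] else [2]
    else []

-- B's filter predicate and per-line score (proof helpers only).
def pB (line : String) : Bool :=
  let h := PySem.Chars.slice line.toList (some 0) (some 1)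
  h == ['A'] || h == ['B'] || h == ['C']

def outB (line : String) : Int :=
  match PySem.Str.pyGet? line 2 with
  | none => 0
  | some c2 => if c2 = 'Z' then 2 else if c2 = 'Y' then 1 else 0

def gB (line : String) : Int :=
  (match PySem.Str.pyGet? line 0 with
   | none => 0
   | some c0 => PySem.Int.mod (PySem.Chars.find ['A', 'B', 'C'] [c0] + outB line - 1) 3) + 1 + 3 * outB line

theorem stepA_eq_flatMap (moves : List String) :
    step_score moves = moves.flatMap perA := by
  unfold step_score
  have h : (fun (points : List Int) (line : String) =>
      match PySem.Str.pyGet? line 0 with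
      | none => points
      | some c0 =>
        if c0 = 'A' then
          match PySem.Str.pyGet? line 2 with
          | none => points
          | some c2 => if c2 = 'Y' then points ++ [4] else if c2 = 'Z' then points ++ [8] else points ++ [3]
        else if c0 = 'B' then
          match PySem.Str.pyGet? line 2 with
          | none => points
          | some c2 => if c2 = 'Y' then points ++ [5] else if c2 = 'Z' then points ++ [9] else points ++ [1]
        else if c0 = 'C' then
          match PySem.Str.pyGet? line 2 with
          | none => points
          | some c2 => if c2 = 'Y' then points ++ [6] else if c2 = 'Z' then points ++ [7] else points ++ [2]
        else points) = (fun points line => points ++ perA line) := by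
    funext points line
    unfold perA
    rcases PySem.Str.pyGet? line 0 with _ | c0
    · simp
    · rcases PySem.Str.pyGet? line 2 with _ | c2 <;> by_cases hA : c0 = 'A' <;> by_cases hB : c0 = 'B' <;> by_cases hC : c0 = 'C' <;> simp [hA, hB, hC] <;> split_ifs <;> simp
  rw [h, PySem.List.foldl_append_eq_flatMap]
  simp

theorem zip_self_map {α β : Type} (v : List α) (f : α → β) :
    v.zip (v.map f) = v.map (fun a => (a, f a)) := by
  induction v with
  | nil => rfl
  | cons x xs ih => simp [ih]

theorem stepB_eq_filter_map (moves : List String) :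
    step_score_alt moves = (moves.filter pB).map gB := by
  unfold step_score_alt
  dsimp only
  rw [zip_self_map, List.map_map, List.zip_map', List.map_map]
  apply List.map_congr_left
  intro line _
  simp [gB, outB, Function.comp]

theorem perLine_eq (line : String)
    (h1 : line.toList ≠ [])
    (h2 : line.toList.head? = some 'A' ∨ line.toList.head? = some 'B' ∨ line.toList.head? = some 'C' →
      3 ≤ line.toList.length) :
    perA line = if pB line then [gB line] else [] := by
  have hg0 : PySem.Str.pyGet? line 0 = line.toList[0]? := by simp [PySem.List.pyGet?_zero]
  have hsl : PySem.Chars.slice line.toList (some 0) (some 1) = line.toList.take 1 := by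
    simpa using PySem.List.slice_natCast line.toList 0 1
  match hl : line.toList with
  | [] => exact absurd hl h1
  | [c0] =>
    have hne : c0 ≠ 'A' ∧ c0 ≠ 'B' ∧ c0 ≠ 'C' := by
      refine ⟨?_, ?_, ?_⟩ <;> intro hc <;>
        · have := h2 (by rw [hl, hc]; simp)
          rw [hl] at this; simp at this
    unfold perA pB
    rw [hg0, hl]; rw [hl] at hsl; rw [hsl]
    simp [hne.1, hne.2.1, hne.2.2]
  | [c0, c1] =>
    have hne : c0 ≠ 'A' ∧ c0 ≠ 'B' ∧ c0 ≠ 'C' := by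
      refine ⟨?_, ?_, ?_⟩ <;> intro hc <;>
        · have := h2 (by rw [hl, hc]; simp)
          rw [hl] at this; simp at this
    unfold perA pB
    rw [hg0, hl]; rw [hl] at hsl; rw [hsl]
    simp [hne.1, hne.2.1, hne.2.2]
  | c0 :: c1 :: c2 :: rest =>
    have hg2 : PySem.Str.pyGet? line 2 = some c2 := by
      rw [show ((2 : Int)) = ((2 : Nat) : Int) by norm_num, PySem.Str.pyGet?_natCast, hl]
      rfl
    unfold perA pB gB outB
    rw [hg0, hg2, hl]; rw [hl] at hsl; rw [hsl]
    by_cases hA : c0 = 'A'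
    · subst hA
      by_cases hY : c2 = 'Y' <;> by_cases hZ : c2 = 'Z' <;> simp_all [PySem.Int.mod] <;> decide
    by_cases hB : c0 = 'B'
    · subst hB
      by_cases hY : c2 = 'Y' <;> by_cases hZ : c2 = 'Z' <;> simp_all [PySem.Int.mod] <;> decide
    by_cases hC : c0 = 'C'
    · subst hC
      by_cases hY : c2 = 'Y' <;> by_cases hZ : c2 = 'Z' <;> simp_all [PySem.Int.mod] <;> decide
    simp [hA, hB, hC]

theorem flatMap_eq_filter_map (moves : List String) :
    Pre_step_score moves → moves.flatMap perA = (moves.filter pB).map gB := by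
  induction moves with
  | nil => intro _; rfl
  | cons x xs ih =>
    intro hpre
    have hx := hpre x (by simp)
    have hrest : Pre_step_score xs := fun l hl => hpre l (by simp [hl])
    rw [List.flatMap_cons, List.filter_cons, perLine_eq x hx.1 hx.2]
    by_cases hp : pB x = true <;> simp [hp, ih hrest]

-- ===== VERDICT (by name: the statement is the Claim_ definition above) =====
theorem step_score_spec : Claim_equal_step_score := by
  intro moves _ hpre
  unfold Spec_step_score
  rw [stepA_eq_flatMap, stepB_eq_filter_map, flatMap_eq_filter_map moves hpre]
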